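-- pv_equiv track=rewrite | github.com/Yoriis/GameTheoryFinal | utilities/best_responses.py | compute_best_responses
-- ===== SOURCE A (Python) =====
-- def compute_best_responses(strategies, payoff_matrix, players=["Player 1", "Player 2"]):
--     """
--     Returns a dictionary of best responses for each player.
--
--     Example result:
--     {
--       "Player 1": {"Cooperate": ["Cooperate", "Defect"]},
--       "Player 2": {"Defect": ["Cooperate"]},
--     }
--     """
--     best_responses = {players[0]: {}, players[1]: {}}
--
--     # Separate players payoffs
--     # For Player 1: all payoffs against each P2 action
--     # For Player 2: all payoffs against each P1 action
--     p1_payoffs = {}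
--     p2_payoffs = {}
--
--     for (strat, payoff) in zip(strategies, payoff_matrix):
--         a1 = strat[0][list(strat[0].keys())[0]] # player 1's actions
--         a2 = strat[1][list(strat[1].keys())[0]] # player 2's actions
--
--         if a2 not in p1_payoffs:
--             p1_payoffs[a2] = []
--         if a1 not in p2_payoffs:
--             p2_payoffs[a1] = []
--
--         # This groups payoffs based on opponent action
--         p1_payoffs[a2].append((payoff[0], a1))  # (P1 payoff, P1 action)
--         p2_payoffs[a1].append((payoff[1], a2))  # (P2 payoff, P2 action)
--
--     # Calculate best responses
--     # Finds the maximum payoff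
--     # Returns all actions that achieve that maximum (in case of ties)
--     for opp_action, vals in p1_payoffs.items():
--         max_p1 = max(vals)[0]
--         best_responses[players[0]][opp_action] = [a for p,a in vals if p == max_p1]
--
--     for opp_action, vals in p2_payoffs.items():
--         max_p2 = max(vals)[0]
--         best_responses[players[1]][opp_action] = [a for p,a in vals if p == max_p2]
--
--     return best_responses
-- ===== SOURCE B (Python) =====
-- def compute_best_responses(strategies, payoff_matrix, players=["Player 1", "Player 2"]):
--     """Single-pass variant: per opponent action keep the running best payoff and
--     the list of actions achieving it, instead of grouping all (payoff, action)
--     pairs and doing a max+filter afterwards."""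
--     br1 = {}  # opponent (P2) action -> [best P1 payoff, [P1 actions achieving it]]
--     br2 = {}  # opponent (P1) action -> [best P2 payoff, [P2 actions achieving it]]
--     for strat, payoff in zip(strategies, payoff_matrix):
--         a1 = next(iter(strat[0].values()))
--         a2 = next(iter(strat[1].values()))
--         for table, key, pay, act in ((br1, a2, payoff[0], a1), (br2, a1, payoff[1], a2)):
--             cur = table.get(key)
--             if cur is None or pay > cur[0]:
--                 table[key] = [pay, [act]]
--             elif pay == cur[0]:
--                 cur[1].append(act)
--     best_responses = {players[0]: {}, players[1]: {}}
--     for key, cur in br1.items():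
--         best_responses[players[0]][key] = cur[1]
--     for key, cur in br2.items():
--         best_responses[players[1]][key] = cur[1]
--     return best_responses
-- ===== Notes on version B (the rewrite author's own statement) =====
-- stated objective: alternative
-- what changed: Replaces A's two-phase grouping of all (payoff, action) pairs per opponent action followed by max()+filter per group with a single pass that maintains, per opponent action, the running best payoff and the list of actions achieving it.
import Mathlib
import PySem

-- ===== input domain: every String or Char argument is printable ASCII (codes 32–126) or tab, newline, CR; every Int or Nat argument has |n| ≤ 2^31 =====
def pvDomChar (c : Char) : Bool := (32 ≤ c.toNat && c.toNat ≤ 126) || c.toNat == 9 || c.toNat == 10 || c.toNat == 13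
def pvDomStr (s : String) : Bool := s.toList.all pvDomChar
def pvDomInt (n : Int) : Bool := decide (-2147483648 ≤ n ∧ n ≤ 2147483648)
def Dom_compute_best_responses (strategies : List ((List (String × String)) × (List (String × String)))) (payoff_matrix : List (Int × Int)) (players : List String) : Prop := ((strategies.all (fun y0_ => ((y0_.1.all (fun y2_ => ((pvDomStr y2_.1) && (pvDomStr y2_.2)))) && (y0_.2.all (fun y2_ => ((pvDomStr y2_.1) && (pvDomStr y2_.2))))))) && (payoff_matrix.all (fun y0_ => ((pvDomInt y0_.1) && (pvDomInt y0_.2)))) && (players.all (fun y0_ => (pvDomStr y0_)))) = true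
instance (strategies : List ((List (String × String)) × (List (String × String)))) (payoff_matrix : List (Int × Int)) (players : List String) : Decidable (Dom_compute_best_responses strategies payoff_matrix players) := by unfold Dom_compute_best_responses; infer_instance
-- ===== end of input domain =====

-- B replaces A's two-phase "group all (payoff, action) pairs per opponent action, then max + filter
-- per group" by a single pass keeping, per opponent action, the running best payoff and the list of
-- actions achieving it (objective: alternative decomposition, same asymptotic cost).

-- ===== PORT A =====
-- a = strat[i][list(strat[i].keys())[0]]; the "" defaults are never used on Pre_ (nonempty dicts)
def pvFirstVal (d : PySem.Dict String String) : String :=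
  (d.get? ((PySem.List.pyGet? d.keys 0).getD "")).getD ""

-- Python's max() over (int, str) tuples: first maximal element, lexicographic tuple order
def pyTupGt (x m : Int × String) : Bool := decide (m.1 < x.1) || (x.1 == m.1 && decide (m.2 < x.2))

-- max(vals): [] is unreachable (every group receives an element before it is read)
def pyMaxTup : List (Int × String) → Int × String
  | [] => (0, "")
  | v :: t => t.foldl (fun m x => if pyTupGt x m then x else m) v

-- body of A's grouping loop over zip(strategies, payoff_matrix)
def pvAStep (d : PySem.Dict String (List (Int × String)) × PySem.Dict String (List (Int × String)))
    (sp : ((List (String × String)) × (List (String × String))) × (Int × Int)) :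
    PySem.Dict String (List (Int × String)) × PySem.Dict String (List (Int × String)) :=
  let a1 := pvFirstVal (PySem.Dict.ofList sp.1.1)
  let a2 := pvFirstVal (PySem.Dict.ofList sp.1.2)
  let d1 := if d.1.contains a2 then d.1 else d.1.insert a2 []   -- if a2 not in p1_payoffs: … = []
  let d1 := d1.modify a2 [] (· ++ [(sp.2.1, a1)])               -- p1_payoffs[a2].append(…)
  let d2 := if d.2.contains a1 then d.2 else d.2.insert a1 []
  let d2 := d2.modify a1 [] (· ++ [(sp.2.2, a2)])
  (d1, d2)

-- best_responses[players[i]][opp] = [a for p,a in vals if p == max(vals)[0]]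
-- (the outer key players[i] is always present, so modify's default inner dict is never used)
def pvABest (pk : String) (b : PySem.Dict String (PySem.Dict String (List String)))
    (kv : String × List (Int × String)) : PySem.Dict String (PySem.Dict String (List String)) :=
  b.modify pk PySem.Dict.empty (fun inner =>
    inner.insert kv.1 ((kv.2.filter (fun pa => pa.1 == (pyMaxTup kv.2).1)).map (·.2)))

def compute_best_responses (strategies : List ((List (String × String)) × (List (String × String)))) (payoff_matrix : List (Int × Int)) (players : List String) : List (String × List (String × List String)) :=
  let p0 := (PySem.List.pyGet? players 0).getD ""
  let p1 := (PySem.List.pyGet? players 1).getD ""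
  -- best_responses = {players[0]: {}, players[1]: {}}
  let best0 : PySem.Dict String (PySem.Dict String (List String)) :=
    (PySem.Dict.empty.insert p0 PySem.Dict.empty).insert p1 PySem.Dict.empty
  let pp := (strategies.zip payoff_matrix).foldl pvAStep (PySem.Dict.empty, PySem.Dict.empty)
  let best1 := pp.1.items.foldl (pvABest p0) best0
  let best2 := pp.2.items.foldl (pvABest p1) best1
  best2.items.map (fun kv => (kv.1, kv.2.items))

-- ===== PORT B =====
-- cur = table.get(key); None / greater / equal / smaller cases of the running best
def pvBUpd (d : PySem.Dict String (Int × List String)) (k : String) (p : Int) (a : String) :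
    PySem.Dict String (Int × List String) :=
  match d.get? k with
  | none => d.insert k (p, [a])
  | some c => if decide (c.1 < p) then d.insert k (p, [a])
              else if p == c.1 then d.insert k (c.1, c.2 ++ [a]) else d

-- body of B's single pass: update both running-best tables
def pvBStep (b : PySem.Dict String (Int × List String) × PySem.Dict String (Int × List String))
    (sp : ((List (String × String)) × (List (String × String))) × (Int × Int)) :
    PySem.Dict String (Int × List String) × PySem.Dict String (Int × List String) :=
  let a1 := ((PySem.Dict.ofList sp.1.1).values.head?).getD ""   -- next(iter(strat[0].values()))
  let a2 := ((PySem.Dict.ofList sp.1.2).values.head?).getD ""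
  (pvBUpd b.1 a2 sp.2.1 a1, pvBUpd b.2 a1 sp.2.2 a2)

-- best_responses[players[i]][key] = cur[1]  (write-back of the accumulated running-best lists)
def pvBWrite (pk : String) (b : PySem.Dict String (PySem.Dict String (List String)))
    (kv : String × (Int × List String)) : PySem.Dict String (PySem.Dict String (List String)) :=
  b.modify pk PySem.Dict.empty (fun inner => inner.insert kv.1 kv.2.2)

def compute_best_responses_alt (strategies : List ((List (String × String)) × (List (String × String)))) (payoff_matrix : List (Int × Int)) (players : List String) : List (String × List (String × List String)) :=
  let br := (strategies.zip payoff_matrix).foldl pvBStep (PySem.Dict.empty, PySem.Dict.empty)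
  let best0 : PySem.Dict String (PySem.Dict String (List String)) :=
    (PySem.Dict.empty.insert ((PySem.List.pyGet? players 0).getD "") PySem.Dict.empty).insert
      ((PySem.List.pyGet? players 1).getD "") PySem.Dict.empty
  let best1 := br.1.items.foldl (pvBWrite ((PySem.List.pyGet? players 0).getD "")) best0
  let best2 := br.2.items.foldl (pvBWrite ((PySem.List.pyGet? players 1).getD "")) best1
  best2.items.map (fun kv => (kv.1, kv.2.items))

-- ===== PRECONDITION & SPEC =====
-- Pre_ excludes only the inputs on which Python A raises IndexError: players with fewer than
-- two names, and a zipped strategy with an empty dict (list(strat[i].keys())[0]).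
def Pre_compute_best_responses (strategies : List ((List (String × String)) × (List (String × String)))) (payoff_matrix : List (Int × Int)) (players : List String) : Prop :=
  2 ≤ players.length ∧ ∀ sp ∈ strategies.zip payoff_matrix, sp.1.1 ≠ [] ∧ sp.1.2 ≠ []
instance (strategies : List ((List (String × String)) × (List (String × String)))) (payoff_matrix : List (Int × Int)) (players : List String) : Decidable (Pre_compute_best_responses strategies payoff_matrix players) := by unfold Pre_compute_best_responses; infer_instance

def pvWitness_compute_best_responses : (List ((List (String × String)) × (List (String × String)))) × (List (Int × Int)) × List String :=
  ([([("r", "C")], [("c", "D")]), ([("r", "D")], [("c", "D")])], [(3, 1), (3, 2)], ["P1", "P2"])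

def Spec_compute_best_responses (strategies : List ((List (String × String)) × (List (String × String)))) (payoff_matrix : List (Int × Int)) (players : List String) (out : List (String × List (String × List String))) : Prop := out = compute_best_responses_alt strategies payoff_matrix players
instance (strategies : List ((List (String × String)) × (List (String × String)))) (payoff_matrix : List (Int × Int)) (players : List String) (out : List (String × List (String × List String))) : Decidable (Spec_compute_best_responses strategies payoff_matrix players out) := by unfold Spec_compute_best_responses; infer_instance

-- ===== CLAIM (what is proved, stated in full; the proofs are below) =====
def Claim_equal_compute_best_responses : Prop := ∀ (strategies : List ((List (String × String)) × (List (String × String)))) (payoff_matrix : List (Int × Int)) (players : List String), Dom_compute_best_responses strategies payoff_matrix players → Pre_compute_best_responses strategies payoff_matrix players → Spec_compute_best_responses strategies payoff_matrix players (compute_best_responses strategies payoff_matrix players)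

-- ===== LEMMAS AND PROOFS =====

-- the maximum payoff of a group (0 for the unreachable empty group)
def maxP : List (Int × String) → Int
  | [] => 0
  | v :: t => t.foldl (fun a x => max a x.1) v.1

-- A's per-group result, as one value: (max payoff, actions achieving it)
def gBest (vals : List (Int × String)) : Int × List String :=
  (maxP vals, (vals.filter (fun pa => pa.1 == maxP vals)).map (·.2))

theorem pyMaxTup_fold_fst (t : List (Int × String)) : ∀ v : Int × String,
    (t.foldl (fun m x => if pyTupGt x m then x else m) v).1 = t.foldl (fun a x => max a x.1) v.1 := by
  induction t with
  | nil => intro v; rfl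
  | cons x t ih =>
    intro v
    simp only [List.foldl_cons]
    rw [ih]
    congr 1
    by_cases h : pyTupGt x v = true
    · simp only [h, if_true]
      simp only [pyTupGt, Bool.or_eq_true, decide_eq_true_eq, Bool.and_eq_true, beq_iff_eq] at h
      rcases h with h | ⟨h, _⟩ <;> omega
    · simp only [eq_false_of_ne_true h, Bool.false_eq_true, if_false]
      have hx : ¬ v.1 < x.1 := by
        intro hx; exact h (by simp [pyTupGt, hx])
      omega

theorem pyMaxTup_fst (vals : List (Int × String)) : (pyMaxTup vals).1 = maxP vals := by
  cases vals with
  | nil => rfl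
  | cons v t => exact pyMaxTup_fold_fst t v

theorem maxP_isMax (vals : List (Int × String)) : ∀ x ∈ vals, x.1 ≤ maxP vals := by
  cases vals with
  | nil => intro x hx; simp at hx
  | cons v t =>
    intro x hx
    have h := PySem.List.le_foldl_max_int t (·.1) v.1
    rcases List.mem_cons.mp hx with rfl | hm
    · exact h.1
    · exact h.2 x hm

theorem maxP_append (vals : List (Int × String)) (h : vals ≠ []) (x : Int × String) :
    maxP (vals ++ [x]) = max (maxP vals) x.1 := by
  cases vals with
  | nil => exact absurd rfl h
  | cons v t => simp [maxP, List.foldl_append]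

theorem gBest_singleton (p : Int) (a : String) : gBest [(p, a)] = (p, [a]) := by
  simp [gBest, maxP, List.filter]

theorem gBest_append (vals : List (Int × String)) (h : vals ≠ []) (p : Int) (a : String) :
    gBest (vals ++ [(p, a)]) =
      (if decide ((gBest vals).1 < p) then ((p : Int), [a])
       else if p == (gBest vals).1 then ((gBest vals).1, (gBest vals).2 ++ [a]) else gBest vals) := by
  have hfst : (gBest vals).1 = maxP vals := rfl
  have hsnd : (gBest vals).2 = (vals.filter (fun pa => pa.1 == maxP vals)).map (·.2) := rfl
  have hmax := maxP_append vals h (p, a)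
  by_cases h1 : maxP vals < p
  · have hm : maxP (vals ++ [(p, a)]) = p := by rw [hmax]; simp; omega
    rw [hfst, if_pos (by simpa using h1)]
    unfold gBest
    rw [hm]
    have hnil : vals.filter (fun pa => pa.1 == p) = [] := by
      rw [List.filter_eq_nil_iff]
      intro pa hpa
      have := maxP_isMax vals pa hpa
      simp only [beq_iff_eq]
      omega
    simp [List.filter_append, hnil]
  · have hm : maxP (vals ++ [(p, a)]) = maxP vals := by rw [hmax]; simp; omega
    rw [hfst, if_neg (by simpa using h1)]
    by_cases h2 : p = maxP vals
    · rw [if_pos (by simp [h2]), hsnd]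
      unfold gBest
      rw [hm]
      have hx : ((p, a).1 == maxP vals) = true := by simp [h2]
      simp [List.filter_append, hx]
    · rw [if_neg (by simp [h2])]
      unfold gBest
      rw [hm]
      have hx : ((p, a).1 == maxP vals) = false := by simp [h2]
      simp [List.filter_append, hx]

-- the two ports read the same first strategy value
theorem firstVal_eq (d : PySem.Dict String String) :
    pvFirstVal d = (d.values.head?).getD "" := by
  cases d with
  | mk l =>
    cases l with
    | nil => rfl
    | cons kv rest =>
      obtain ⟨k, v⟩ := kv
      simp [pvFirstVal, PySem.Dict.keys, PySem.Dict.values, PySem.List.pyGet?, PySem.List.pyIdx?,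
        PySem.Dict.get?_mk_cons]

-- invariant between A's group dict and B's running-best dict
def pvRel (dA : PySem.Dict String (List (Int × String))) (dB : PySem.Dict String (Int × List String)) : Prop :=
  dB.keys = dA.keys ∧ dA.keys.Nodup ∧
  ∀ k ∈ dA.keys, dA.getD k [] ≠ [] ∧ dB.getD k (0, []) = gBest (dA.getD k [])

theorem pvRel_empty : pvRel PySem.Dict.empty PySem.Dict.empty := by
  refine ⟨rfl, ?_, ?_⟩ <;> simp [PySem.Dict.keys, PySem.Dict.empty]

theorem pvRel_step (dA : PySem.Dict String (List (Int × String)))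
    (dB : PySem.Dict String (Int × List String)) (hR : pvRel dA dB) (k : String) (p : Int) (a : String) :
    pvRel ((if dA.contains k then dA else dA.insert k []).modify k [] (· ++ [(p, a)]))
      (pvBUpd dB k p a) := by
  obtain ⟨hkeys, hnd, hvals⟩ := hR
  by_cases hc : dA.contains k = true
  · -- key already grouped
    rw [if_pos hc]
    have hkmem : k ∈ dA.keys := (PySem.Dict.contains_iff_mem_keys dA k).mp hc
    have hAkeys : (dA.modify k [] (· ++ [(p, a)])).keys = dA.keys := by
      rw [PySem.Dict.keys_modify, PySem.Dict.keys_insert_of_contains dA _ hc]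
    have hAgetD : ∀ j, (dA.modify k [] (· ++ [(p, a)])).getD j [] =
        if j = k then dA.getD k [] ++ [(p, a)] else dA.getD j [] := fun j =>
      PySem.Dict.getD_modify dA k j [] (· ++ [(p, a)])
    have hBmem : k ∈ dB.keys := hkeys ▸ hkmem
    have hBsome : dB.get? k = some (dB.getD k (0, [])) := by
      cases hg : dB.get? k with
      | none => exact absurd ((PySem.Dict.get?_eq_none_iff_not_mem_keys dB k).mp hg) (by simp [hBmem])
      | some v => rw [PySem.Dict.getD_of_get?_eq_some dB (0, []) hg]
    have hBc : dB.contains k = true := (PySem.Dict.contains_iff_mem_keys dB k).mpr hBmem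
    obtain ⟨hne, hgb⟩ := hvals k hkmem
    have happ := gBest_append (dA.getD k []) hne p a
    rw [← hgb] at happ
    simp only [pvBUpd, hBsome]
    constructor
    · -- keys
      split
      · rw [PySem.Dict.keys_insert_of_contains dB _ hBc, hAkeys, hkeys]
      · split
        · rw [PySem.Dict.keys_insert_of_contains dB _ hBc, hAkeys, hkeys]
        · rw [hAkeys, hkeys]
    refine ⟨hAkeys ▸ hnd, fun j hj => ?_⟩
    rw [hAkeys] at hj
    by_cases hjk : j = k
    · subst hjk
      refine ⟨by rw [hAgetD, if_pos rfl]; simp, ?_⟩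
      rw [hAgetD, if_pos rfl, happ]
      split
      · rw [PySem.Dict.getD_insert_self]
      · split
        · rw [PySem.Dict.getD_insert_self]
        · rfl
    · obtain ⟨hne', hgb'⟩ := hvals j hj
      refine ⟨by rw [hAgetD, if_neg hjk]; exact hne', ?_⟩
      rw [hAgetD, if_neg hjk]
      split
      · rw [PySem.Dict.getD_insert_of_ne _ _ _ hjk]; exact hgb'
      · split
        · rw [PySem.Dict.getD_insert_of_ne _ _ _ hjk]; exact hgb'
        · exact hgb'
  · -- fresh key
    rw [if_neg hc]
    have hcf : dA.contains k = false := by simpa using hc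
    have hknot : k ∉ dA.keys := fun hm => hc ((PySem.Dict.contains_iff_mem_keys dA k).mpr hm)
    have hic : (dA.insert k ([] : List (Int × String))).contains k = true := by
      rw [PySem.Dict.contains_insert]; simp
    have hAkeys : ((dA.insert k []).modify k [] (· ++ [(p, a)])).keys = dA.keys ++ [k] := by
      rw [PySem.Dict.keys_modify, PySem.Dict.keys_insert_of_contains _ _ hic,
        PySem.Dict.keys_insert_of_not_contains dA _ hcf]
    have hAgetD : ∀ j, ((dA.insert k []).modify k [] (· ++ [(p, a)])).getD j [] =
        if j = k then [(p, a)] else dA.getD j [] := by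
      intro j
      rw [PySem.Dict.getD_modify]
      by_cases hjk : j = k
      · rw [if_pos hjk, if_pos hjk, PySem.Dict.getD_insert_self]; rfl
      · rw [if_neg hjk, if_neg hjk, PySem.Dict.getD_insert_of_ne _ _ _ hjk]
    have hBnone : dB.get? k = none :=
      (PySem.Dict.get?_eq_none_iff_not_mem_keys dB k).mpr (hkeys ▸ hknot)
    have hBcf : dB.contains k = false := (PySem.Dict.get?_eq_none_iff_contains dB k).mp hBnone
    simp only [pvBUpd, hBnone]
    refine ⟨?_, ?_, fun j hj => ?_⟩
    · rw [PySem.Dict.keys_insert_of_not_contains dB _ hBcf, hAkeys, hkeys]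
    · rw [hAkeys]
      simp [List.nodup_append, hnd]
      intro x hx hxk
      exact hknot (hxk ▸ hx)
    · rw [hAkeys] at hj
      rcases List.mem_append.mp hj with hj | hj
      · have hjk : j ≠ k := fun h => hknot (h ▸ hj)
        obtain ⟨hne', hgb'⟩ := hvals j hj
        refine ⟨by rw [hAgetD, if_neg hjk]; exact hne', ?_⟩
        rw [hAgetD, if_neg hjk, PySem.Dict.getD_insert_of_ne _ _ _ hjk]
        exact hgb'
      · have hjk : j = k := by simpa using hj
        subst hjk
        refine ⟨by rw [hAgetD, if_pos rfl]; simp, ?_⟩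
        rw [hAgetD, if_pos rfl, PySem.Dict.getD_insert_self, gBest_singleton]

theorem pvRel_fold (l : List (((List (String × String)) × (List (String × String))) × (Int × Int)))
    (dA1 dA2 : PySem.Dict String (List (Int × String)))
    (dB1 dB2 : PySem.Dict String (Int × List String))
    (h1 : pvRel dA1 dB1) (h2 : pvRel dA2 dB2) :
    pvRel (l.foldl pvAStep (dA1, dA2)).1 (l.foldl pvBStep (dB1, dB2)).1 ∧
    pvRel (l.foldl pvAStep (dA1, dA2)).2 (l.foldl pvBStep (dB1, dB2)).2 := by
  induction l generalizing dA1 dA2 dB1 dB2 with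
  | nil => exact ⟨h1, h2⟩
  | cons sp t ih =>
    simp only [List.foldl_cons]
    apply ih
    · simpa only [pvAStep, pvBStep, firstVal_eq] using
        pvRel_step dA1 dB1 h1 (((PySem.Dict.ofList sp.1.2).values.head?).getD "") sp.2.1
          (((PySem.Dict.ofList sp.1.1).values.head?).getD "")
    · simpa only [pvAStep, pvBStep, firstVal_eq] using
        pvRel_step dA2 dB2 h2 (((PySem.Dict.ofList sp.1.1).values.head?).getD "") sp.2.2
          (((PySem.Dict.ofList sp.1.2).values.head?).getD "")

-- related dicts give the same per-opponent best-response lists, in the same order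
theorem pvRel_items (dA : PySem.Dict String (List (Int × String)))
    (dB : PySem.Dict String (Int × List String)) (hR : pvRel dA dB) :
    dB.items.map (fun kv => (kv.1, kv.2.2)) =
    dA.items.map (fun kv => (kv.1, (kv.2.filter (fun pa => pa.1 == (pyMaxTup kv.2).1)).map (·.2))) := by
  obtain ⟨hkeys, hnd, hvals⟩ := hR
  have hndB : dB.keys.Nodup := hkeys ▸ hnd
  rw [PySem.Dict.items_eq_map_keys dA hnd [], PySem.Dict.items_eq_map_keys dB hndB (0, []), hkeys,
    List.map_map, List.map_map]
  apply List.map_congr_left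
  intro j hj
  obtain ⟨hne, hgb⟩ := hvals j hj
  simp only [Function.comp_apply, pyMaxTup_fst]
  rw [hgb]
  rfl

-- A's write-back loop touches only the key pk
-- A's write-back loop is a fold of pure inserts over the mapped items list
theorem aBest_foldl_map (l : List (String × List (Int × String))) (pk : String)
    (b : PySem.Dict String (PySem.Dict String (List String))) :
    l.foldl (pvABest pk) b =
      (l.map (fun kv => (kv.1, (kv.2.filter (fun pa => pa.1 == (pyMaxTup kv.2).1)).map (·.2)))).foldl
        (fun b q => b.modify pk PySem.Dict.empty (fun inner => inner.insert q.1 q.2)) b := by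
  rw [List.foldl_map]
  rfl

-- B's write-back loop, in the same shape
theorem bWrite_foldl_map (l : List (String × (Int × List String))) (pk : String)
    (b : PySem.Dict String (PySem.Dict String (List String))) :
    l.foldl (pvBWrite pk) b =
      (l.map (fun kv => (kv.1, kv.2.2))).foldl
        (fun b q => b.modify pk PySem.Dict.empty (fun inner => inner.insert q.1 q.2)) b := by
  rw [List.foldl_map]
  rfl

-- ===== VERDICT (by name: the statement is the Claim_ definition above) =====
theorem compute_best_responses_spec : Claim_equal_compute_best_responses := by
  intro strategies payoff_matrix players _ _
  unfold Spec_compute_best_responses compute_best_responses compute_best_responses_alt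
  dsimp only
  obtain ⟨R1, R2⟩ := pvRel_fold (strategies.zip payoff_matrix) PySem.Dict.empty PySem.Dict.empty
    PySem.Dict.empty PySem.Dict.empty pvRel_empty pvRel_empty
  simp only [aBest_foldl_map, bWrite_foldl_map]
  rw [pvRel_items _ _ R1, pvRel_items _ _ R2]
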